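-- pv_equiv track=rewrite | github.com/nttmkhang/FlowChartPython | 055B/_055B.py | TichUocLe
-- ===== SOURCE A (Python) =====
-- def TichUocLe(n):
-- 	i=3
-- 	T=1
-- 	while(i<=n):
-- 		if n%i==0:
-- 			T=T*i
-- 		i=i+2
-- 	return T
-- ===== SOURCE B (Python) =====
-- def TichUocLe(n):
--     # Enumerate divisors in pairs (d, n//d) up to sqrt(n) instead of scanning all odd i <= n.
--     T = 1
--     d = 1
--     while d * d <= n:
--         if n % d == 0:
--             if d % 2 == 1 and d >= 3:
--                 T = T * d
--             q = n // d
--             if q != d and q % 2 == 1 and q >= 3: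
--                 T = T * q
--         d = d + 1
--     return T
-- ===== Notes on version B (the rewrite author's own statement) =====
-- stated objective: faster
-- what changed: B enumerates divisor pairs (d, n//d) for d up to sqrt(n) and multiplies the odd ones >= 3, instead of A's scan over every odd i from 3 to n.
import Mathlib
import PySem

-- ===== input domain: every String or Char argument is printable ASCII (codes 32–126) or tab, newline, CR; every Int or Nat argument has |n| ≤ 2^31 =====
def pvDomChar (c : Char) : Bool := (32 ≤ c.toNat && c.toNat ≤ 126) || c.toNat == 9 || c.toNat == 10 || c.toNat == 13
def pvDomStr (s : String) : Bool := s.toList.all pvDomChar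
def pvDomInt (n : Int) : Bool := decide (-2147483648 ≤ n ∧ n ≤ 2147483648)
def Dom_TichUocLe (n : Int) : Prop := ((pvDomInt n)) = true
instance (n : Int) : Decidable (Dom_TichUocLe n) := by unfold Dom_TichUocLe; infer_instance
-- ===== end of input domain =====

-- B replaces A's scan over every odd i in [3, n] by an enumeration of divisor
-- pairs (d, n // d) for d up to sqrt(n); objective: faster (asymptotic).

-- ===== PORT A =====
-- while(i<=n): if n%i==0: T=T*i; i=i+2
def TichUocLe_loop (n i T : Int) : Int :=
  if i ≤ n then
    TichUocLe_loop n (i + 2) (if PySem.Int.mod n i = 0 then T * i else T)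
  else T
termination_by (n + 2 - i).toNat
decreasing_by omega

def TichUocLe (n : Int) : Int := TichUocLe_loop n 3 1

-- ===== PORT B =====
-- used by the port's termination argument
theorem pv_le_mul_self (d : Int) : d ≤ d * d := by
  rcases le_or_gt d 0 with h | h
  · exact le_trans h (mul_self_nonneg d)
  · nlinarith

-- while d*d<=n: if n%d==0: (maybe T*=d); q=n//d; (maybe T*=q); d=d+1
def TichUocLe_alt_loop (n d T : Int) : Int :=
  if d * d ≤ n then
    TichUocLe_alt_loop n (d + 1)
      (if PySem.Int.mod n d = 0 then
        (let T1 := if PySem.Int.mod d 2 = 1 ∧ 3 ≤ d then T * d else T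
         let q := PySem.Int.floordiv n d
         if q ≠ d ∧ PySem.Int.mod q 2 = 1 ∧ 3 ≤ q then T1 * q else T1)
       else T)
  else T
termination_by (n + 2 - d).toNat
decreasing_by have := pv_le_mul_self d; omega

def TichUocLe_alt (n : Int) : Int := TichUocLe_alt_loop n 1 1

-- ===== PRECONDITION & SPEC =====
def Spec_TichUocLe (n : Int) (out : Int) : Prop := out = TichUocLe_alt n
instance (n : Int) (out : Int) : Decidable (Spec_TichUocLe n out) := by unfold Spec_TichUocLe; infer_instance

-- ===== CLAIM (what is proved, stated in full; the proofs are below) =====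
def Claim_equal_TichUocLe : Prop := ∀ (n : Int), Dom_TichUocLe n → Spec_TichUocLe n (TichUocLe n)

-- ===== LEMMAS AND PROOFS =====
-- Both loops compute the product of the odd j in [3, n] with n % j = 0:
-- A's loop scans them directly; B's loop emits each such j once, at step
-- d = min (j, n / j), which is the unique divisor of the pair {j, n / j}
-- lying below sqrt n.

theorem loopA_eq (n i T : Int) (h3 : 3 ≤ i) (hodd : i % 2 = 1) :
    TichUocLe_loop n i T =
      T * ∏ j ∈ (Finset.Icc i n).filter (fun j => j % 2 = 1 ∧ n % j = 0), j := by
  induction i, T using TichUocLe_loop.induct (n := n) with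
  | case1 i T h ih =>
    rw [TichUocLe_loop, if_pos h]
    simp only [dite_eq_ite] at ih
    rw [ih (by omega) (by omega)]
    have hmod : PySem.Int.mod n i = n % i := PySem.Int.mod_eq_emod_of_pos (by omega)
    have hstep : (Finset.Icc i n).filter (fun j => j % 2 = 1 ∧ n % j = 0)
        = if n % i = 0 then insert i ((Finset.Icc (i+2) n).filter (fun j => j % 2 = 1 ∧ n % j = 0))
          else (Finset.Icc (i+2) n).filter (fun j => j % 2 = 1 ∧ n % j = 0) := by
      split_ifs with hd
      · ext j
        simp only [Finset.mem_filter, Finset.mem_Icc, Finset.mem_insert]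
        constructor
        · rintro ⟨⟨hij, hjn⟩, ho, hdj⟩
          by_cases hji : j = i
          · exact Or.inl hji
          · exact Or.inr ⟨⟨by omega, hjn⟩, ho, hdj⟩
        · rintro (rfl | ⟨⟨hij, hjn⟩, ho, hdj⟩)
          · exact ⟨⟨le_refl _, h⟩, hodd, hd⟩
          · exact ⟨⟨by omega, hjn⟩, ho, hdj⟩
      · ext j
        simp only [Finset.mem_filter, Finset.mem_Icc]
        constructor
        · rintro ⟨⟨hij, hjn⟩, ho, hdj⟩
          have hji : j ≠ i := by rintro rfl; exact hd hdj
          exact ⟨⟨by omega, hjn⟩, ho, hdj⟩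
        · rintro ⟨⟨hij, hjn⟩, ho, hdj⟩
          exact ⟨⟨by omega, hjn⟩, ho, hdj⟩
    rw [hstep, hmod]
    split_ifs with hd
    · rw [Finset.prod_insert (by simp only [Finset.mem_filter, Finset.mem_Icc]; omega)]
      ring
    · ring
  | case2 i T h =>
    rw [TichUocLe_loop, if_neg h]
    rw [Finset.Icc_eq_empty (by omega), Finset.filter_empty, Finset.prod_empty, mul_one]

set_option maxHeartbeats 1000000 in
theorem loopB_eq (n d T : Int) (hd : 1 ≤ d) :
    TichUocLe_alt_loop n d T =
      T * ∏ j ∈ (Finset.Icc 3 n).filter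
            (fun j => (j % 2 = 1 ∧ n % j = 0) ∧ d ≤ j ∧ d ≤ n / j), j := by
  induction d, T using TichUocLe_alt_loop.induct (n := n) with
  | case1 d T h ih =>
    rw [TichUocLe_alt_loop, if_pos h]
    simp only [dite_eq_ite] at ih
    rw [ih (by omega)]
    have hdn : d ≤ n := le_trans (pv_le_mul_self d) h
    have hmodn : PySem.Int.mod n d = n % d := PySem.Int.mod_eq_emod_of_pos (by omega)
    have hfd : PySem.Int.floordiv n d = n / d := PySem.Int.floordiv_eq_ediv_of_pos (by omega)
    have hmodd : PySem.Int.mod d 2 = d % 2 := PySem.Int.mod_eq_emod_of_pos (by omega)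
    rw [hmodn, hfd, hmodd]
    set q : Int := n / d with hqdef
    have hmodq : PySem.Int.mod q 2 = q % 2 := PySem.Int.mod_eq_emod_of_pos (by omega)
    rw [hmodq]
    by_cases hdd : n % d = 0
    · -- d divides n
      have hdq : d * q = n := by
        rw [hqdef]; have := Int.mul_ediv_add_emod n d; omega
      have hdleq : d ≤ q := le_of_mul_le_mul_left (by linarith) (by omega : (0:Int) < d)
      have hq1 : 1 ≤ q := le_trans hd hdleq
      have hqlen : q ≤ n := by nlinarith
      have hnq : n / q = d := by
        rw [← hdq, mul_comm]; exact Int.mul_ediv_cancel_left d (by omega)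
      have hqdvd : n % q = 0 := Int.emod_eq_zero_of_dvd ⟨d, by linarith⟩
      have hmem : ∀ j : Int,
          (j ∈ (Finset.Icc 3 n).filter
              (fun j => (j % 2 = 1 ∧ n % j = 0) ∧ d ≤ j ∧ d ≤ n / j)) ↔
          ((j = d ∧ (d % 2 = 1 ∧ 3 ≤ d)) ∨
           (j = q ∧ (q ≠ d ∧ q % 2 = 1 ∧ 3 ≤ q)) ∨
           j ∈ (Finset.Icc 3 n).filter
              (fun j => (j % 2 = 1 ∧ n % j = 0) ∧ d + 1 ≤ j ∧ d + 1 ≤ n / j)) := by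
        intro j
        simp only [Finset.mem_filter, Finset.mem_Icc]
        constructor
        · rintro ⟨⟨h3j, hjn⟩, ⟨ho, hdj⟩, hdlej, hdlenj⟩
          have hjq : j * (n / j) = n := by have := Int.mul_ediv_add_emod n j; omega
          by_cases hjd : j = d
          · exact Or.inl ⟨hjd, by omega, by omega⟩
          · by_cases hjq' : j = q
            · exact Or.inr (Or.inl ⟨hjq', by omega, by omega, by omega⟩)
            · refine Or.inr (Or.inr ⟨⟨h3j, hjn⟩, ⟨ho, hdj⟩, by omega, ?_⟩)
              have hnjd : n / j ≠ d := by
                intro hcon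
                rw [hcon] at hjq
                have : j = q := by
                  have : d * j = d * q := by linarith [hdq, hjq]
                  exact mul_left_cancel₀ (by omega) this
                exact hjq' this
              omega
        · rintro (⟨rfl, ho, h3⟩ | ⟨rfl, hne, ho, h3⟩ | ⟨⟨h3j, hjn⟩, ⟨ho, hdj⟩, hj1, hnj1⟩)
          · exact ⟨⟨h3, hdn⟩, ⟨ho, hdd⟩, le_refl _, by omega⟩
          · exact ⟨⟨h3, hqlen⟩, ⟨ho, hqdvd⟩, hdleq, by omega⟩
          · exact ⟨⟨h3j, hjn⟩, ⟨ho, hdj⟩, by omega, by omega⟩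
      have hqnot : q ∉ (Finset.Icc 3 n).filter
          (fun j => (j % 2 = 1 ∧ n % j = 0) ∧ d + 1 ≤ j ∧ d + 1 ≤ n / j) := by
        simp only [Finset.mem_filter, Finset.mem_Icc]
        rintro ⟨-, -, -, hcon⟩; omega
      have hdR1 : d ∉ (Finset.Icc 3 n).filter
          (fun j => (j % 2 = 1 ∧ n % j = 0) ∧ d + 1 ≤ j ∧ d + 1 ≤ n / j) := by
        simp only [Finset.mem_filter, Finset.mem_Icc]
        rintro ⟨-, -, hcon, -⟩; omega
      rw [if_pos hdd]
      split_ifs with hcq hcd hcd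
      · -- both q and d contribute
        have hset : (Finset.Icc 3 n).filter
              (fun j => (j % 2 = 1 ∧ n % j = 0) ∧ d ≤ j ∧ d ≤ n / j)
            = insert d (insert q ((Finset.Icc 3 n).filter
              (fun j => (j % 2 = 1 ∧ n % j = 0) ∧ d + 1 ≤ j ∧ d + 1 ≤ n / j))) := by
          ext j
          rw [hmem j]
          simp only [Finset.mem_insert]
          tauto
        have hdnotmem : d ∉ insert q ((Finset.Icc 3 n).filter
            (fun j => (j % 2 = 1 ∧ n % j = 0) ∧ d + 1 ≤ j ∧ d + 1 ≤ n / j)) := by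
          simp only [Finset.mem_insert]
          rintro (hcon | hcon)
          · exact hcq.1 hcon.symm
          · exact hdR1 hcon
        rw [hset, Finset.prod_insert hdnotmem, Finset.prod_insert hqnot]
        ring
      · -- only q contributes
        have hset : (Finset.Icc 3 n).filter
              (fun j => (j % 2 = 1 ∧ n % j = 0) ∧ d ≤ j ∧ d ≤ n / j)
            = insert q ((Finset.Icc 3 n).filter
              (fun j => (j % 2 = 1 ∧ n % j = 0) ∧ d + 1 ≤ j ∧ d + 1 ≤ n / j)) := by
          ext j
          rw [hmem j]
          simp only [Finset.mem_insert]
          tauto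
        rw [hset, Finset.prod_insert hqnot]
        ring
      · -- only d contributes
        have hset : (Finset.Icc 3 n).filter
              (fun j => (j % 2 = 1 ∧ n % j = 0) ∧ d ≤ j ∧ d ≤ n / j)
            = insert d ((Finset.Icc 3 n).filter
              (fun j => (j % 2 = 1 ∧ n % j = 0) ∧ d + 1 ≤ j ∧ d + 1 ≤ n / j)) := by
          ext j
          rw [hmem j]
          simp only [Finset.mem_insert]
          tauto
        rw [hset, Finset.prod_insert hdR1]
        ring
      · -- neither contributes
        have hset : (Finset.Icc 3 n).filter
              (fun j => (j % 2 = 1 ∧ n % j = 0) ∧ d ≤ j ∧ d ≤ n / j)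
            = (Finset.Icc 3 n).filter
              (fun j => (j % 2 = 1 ∧ n % j = 0) ∧ d + 1 ≤ j ∧ d + 1 ≤ n / j) := by
          ext j
          rw [hmem j]
          tauto
        rw [hset]
    · -- d does not divide n
      rw [if_neg hdd]
      have hset : (Finset.Icc 3 n).filter
            (fun j => (j % 2 = 1 ∧ n % j = 0) ∧ d ≤ j ∧ d ≤ n / j)
          = (Finset.Icc 3 n).filter
            (fun j => (j % 2 = 1 ∧ n % j = 0) ∧ d + 1 ≤ j ∧ d + 1 ≤ n / j) := by
        ext j
        simp only [Finset.mem_filter, Finset.mem_Icc]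
        constructor
        · rintro ⟨⟨h3j, hjn⟩, ⟨ho, hdj⟩, hdlej, hdlenj⟩
          have hjq : j * (n / j) = n := by have := Int.mul_ediv_add_emod n j; omega
          have hjd : j ≠ d := by rintro rfl; exact hdd hdj
          have hnjd : n / j ≠ d := by
            intro hcon
            apply hdd
            exact Int.emod_eq_zero_of_dvd ⟨j, by rw [hcon] at hjq; linarith⟩
          exact ⟨⟨h3j, hjn⟩, ⟨ho, hdj⟩, by omega, by omega⟩
        · rintro ⟨⟨h3j, hjn⟩, ⟨ho, hdj⟩, hj1, hnj1⟩
          exact ⟨⟨h3j, hjn⟩, ⟨ho, hdj⟩, by omega, by omega⟩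
      rw [hset]
  | case2 d T h =>
    rw [TichUocLe_alt_loop, if_neg h]
    have hempty : (Finset.Icc 3 n).filter
          (fun j => (j % 2 = 1 ∧ n % j = 0) ∧ d ≤ j ∧ d ≤ n / j) = ∅ := by
      ext j
      simp only [Finset.mem_filter, Finset.mem_Icc, Finset.notMem_empty, iff_false]
      rintro ⟨⟨h3j, hjn⟩, ⟨ho, hdj⟩, hdlej, hdlenj⟩
      have hjq : j * (n / j) = n := by have := Int.mul_ediv_add_emod n j; omega
      have : d * d ≤ j * (n / j) := mul_le_mul hdlej hdlenj (by omega) (by omega)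
      omega
    rw [hempty, Finset.prod_empty, mul_one]

-- ===== VERDICT (by name: the statement is the Claim_ definition above) =====
theorem TichUocLe_spec : Claim_equal_TichUocLe := by
  intro n _
  unfold Spec_TichUocLe TichUocLe TichUocLe_alt
  rcases le_or_gt 1 n with hn | hn
  · rw [loopA_eq n 3 1 le_rfl (by decide), loopB_eq n 1 1 le_rfl, one_mul, one_mul]
    congr 1
    apply Finset.filter_congr
    intro j hj
    simp only [Finset.mem_Icc] at hj
    constructor
    · rintro ⟨ho, hdj⟩
      have hjq : j * (n / j) = n := by have := Int.mul_ediv_add_emod n j; omega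
      have h1 : (1:Int) ≤ n / j := by
        by_contra hcon
        rw [not_le] at hcon
        have : j * (n / j) ≤ 0 := mul_nonpos_of_nonneg_of_nonpos (by omega) (by omega)
        omega
      exact ⟨⟨ho, hdj⟩, by omega, h1⟩
    · rintro ⟨⟨ho, hdj⟩, -, -⟩
      exact ⟨ho, hdj⟩
  · rw [TichUocLe_loop, TichUocLe_alt_loop]
    simp only [if_neg (by omega : ¬ (3:Int) ≤ n), if_neg (by omega : ¬ (1:Int) * 1 ≤ n)]
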